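-- pv_equiv track=rewrite | github.com/Nakazasen/skill-Anti-brain-wiki_note | scripts/abw_output.py | compact_text
-- ===== SOURCE A (Python) =====
-- def compact_text(text, max_lines=4):
--     compacted = []
--     for line in str(text or "").splitlines():
--         stripped = line.strip()
--         if not stripped:
--             continue
--         if stripped.startswith("## Finalization"):
--             break
--         if stripped.startswith(("- current_state:", "- evidence:", "- gaps_or_limitations:", "- next_steps:")):
--             continue
--         compacted.append(stripped)
--         if len(compacted) >= max_lines:
--             break
--     return compacted
-- ===== SOURCE B (Python) =====
-- _META = ("- current_state:", "- evidence:", "- gaps_or_limitations:", "- next_steps:")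
-- _STOP = "## Finalization"
--
--
-- def compact_text(text, max_lines=4):
--     # A non-positive limit keeps nothing.
--     if max_lines <= 0:
--         return []
--     lines = [s for s in (ln.strip() for ln in str(text or "").splitlines()) if s]
--     for i, s in enumerate(lines):
--         if s.startswith(_STOP):
--             lines = lines[:i]
--             break
--     return [s for s in lines if not s.startswith(_META)][:max_lines]
-- ===== Notes on version B (the rewrite author's own statement) =====
-- stated objective: alternative
-- what changed: Replaces A's single fused loop (with early breaks and an accumulator) by staged list passes: strip and drop empty lines, cut the list at the first '## Finalization' heading, filter out metadata prefixes, then slice off the first max_lines items.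
-- intended difference: For max_lines <= 0 on texts containing a non-blank line, A appends the first contributing line (if one exists) before checking the limit and so returns it, while B returns [], the intended result of a non-positive limit. — e.g. on compact_text(some "hi", 0): A returns ["hi"], B returns []
import Mathlib
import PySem

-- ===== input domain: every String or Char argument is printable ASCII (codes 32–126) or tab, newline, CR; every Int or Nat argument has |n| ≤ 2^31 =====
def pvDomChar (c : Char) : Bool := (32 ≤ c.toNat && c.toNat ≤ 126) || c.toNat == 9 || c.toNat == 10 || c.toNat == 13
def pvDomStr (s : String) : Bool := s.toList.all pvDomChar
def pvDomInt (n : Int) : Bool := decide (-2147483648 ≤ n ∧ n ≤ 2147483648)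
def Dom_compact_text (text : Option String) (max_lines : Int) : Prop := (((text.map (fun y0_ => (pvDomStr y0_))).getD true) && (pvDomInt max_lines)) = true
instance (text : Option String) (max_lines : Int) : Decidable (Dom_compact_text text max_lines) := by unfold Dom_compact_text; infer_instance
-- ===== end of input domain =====

-- ===== PORT A =====
-- B restructures A's fused loop into staged passes (strip/drop-empty, cut at the
-- Finalization heading, filter metadata, slice); objective: alternative.
def pvIsMeta (s : String) : Bool :=
  PySem.Str.startswith s "- current_state:" || PySem.Str.startswith s "- evidence:" ||
  PySem.Str.startswith s "- gaps_or_limitations:" || PySem.Str.startswith s "- next_steps:"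

def pvALoop (max_lines : Int) : List String → List String → List String
  | [], compacted => compacted
  | line :: rest, compacted =>
    let stripped := PySem.Str.strip line
    if stripped = "" then pvALoop max_lines rest compacted
    else if PySem.Str.startswith stripped "## Finalization" then compacted
    else if pvIsMeta stripped then pvALoop max_lines rest compacted
    else
      let compacted' := compacted ++ [stripped]
      if max_lines ≤ (compacted'.length : Int) then compacted'
      else pvALoop max_lines rest compacted'

def compact_text (text : Option String) (max_lines : Int) : List String :=
  pvALoop max_lines (PySem.Str.splitlines (text.getD "")) []

-- ===== PORT B =====
def compact_text_alt (text : Option String) (max_lines : Int) : List String :=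
  if max_lines ≤ 0 then []
  else
    let lines := (PySem.Str.splitlines (text.getD "")).filterMap
      (fun ln => let s := PySem.Str.strip ln; if s = "" then none else some s)
    let cut := lines.takeWhile (fun s => !PySem.Str.startswith s "## Finalization")
    (cut.filter (fun s => !pvIsMeta s)).take max_lines.toNat

-- ===== PRECONDITION & SPEC =====
-- For max_lines ≤ 0 on texts containing a non-blank line, A appends the first contributing
-- line (if one exists) before checking the limit and so returns it, while B returns [],
-- the intended result of a non-positive limit.
def D_compact_text (text : Option String) (max_lines : Int) : Prop :=
  max_lines ≤ 0 ∧ (PySem.Str.splitlines (text.getD "")).any (fun l => PySem.Str.strip l != "") = true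
instance (text : Option String) (max_lines : Int) : Decidable (D_compact_text text max_lines) := by unfold D_compact_text; infer_instance

def Spec_compact_text (text : Option String) (max_lines : Int) (out : List String) : Prop := ¬ D_compact_text text max_lines → out = compact_text_alt text max_lines
instance (text : Option String) (max_lines : Int) (out : List String) : Decidable (Spec_compact_text text max_lines out) := by unfold Spec_compact_text; infer_instance

def pvDiffWitness_compact_text : Option String × Int := (some "hi", 0)
def pvDiffWitnessOut_compact_text : (List String) × (List String) := (["hi"], [])

-- ===== CLAIM (what is proved, stated in full; the proofs are below) =====
def Claim_unchanged_compact_text : Prop := ∀ (text : Option String) (max_lines : Int), Dom_compact_text text max_lines → Spec_compact_text text max_lines (compact_text text max_lines)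
def Claim_changed_compact_text : Prop := Dom_compact_text (pvDiffWitness_compact_text.1) (pvDiffWitness_compact_text.2) ∧ D_compact_text (pvDiffWitness_compact_text.1) (pvDiffWitness_compact_text.2) ∧ compact_text (pvDiffWitness_compact_text.1) (pvDiffWitness_compact_text.2) = pvDiffWitnessOut_compact_text.1 ∧ compact_text_alt (pvDiffWitness_compact_text.1) (pvDiffWitness_compact_text.2) = pvDiffWitnessOut_compact_text.2 ∧ pvDiffWitnessOut_compact_text.1 ≠ pvDiffWitnessOut_compact_text.2
-- ===== LEMMAS AND PROOFS =====
def pvPipe (lines : List String) : List String :=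
  ((lines.filterMap (fun ln => let s := PySem.Str.strip ln; if s = "" then none else some s)).takeWhile
      (fun s => !PySem.Str.startswith s "## Finalization")).filter (fun s => !pvIsMeta s)

theorem pvLoop_eq (max_lines : Int) (lines : List String) (acc : List String)
    (h : (acc.length : Int) < max_lines) :
    pvALoop max_lines lines acc = acc ++ (pvPipe lines).take (max_lines.toNat - acc.length) := by
  induction lines generalizing acc with
  | nil => simp [pvALoop, pvPipe]
  | cons line rest ih =>
    simp only [pvALoop, pvPipe] at ih ⊢
    simp only [List.filterMap_cons]
    by_cases h1 : PySem.Str.strip line = ""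
    · rw [if_pos h1, if_pos h1]; exact ih acc h
    · rw [if_neg h1, if_neg h1, List.takeWhile_cons]
      by_cases h2 : PySem.Str.startswith (PySem.Str.strip line) "## Finalization" = true
      · rw [if_pos h2, h2]
        simp only [Bool.not_true, Bool.false_eq_true, if_false, List.filter_nil, List.take_nil, List.append_nil]
      · have h2f : PySem.Str.startswith (PySem.Str.strip line) "## Finalization" = false :=
          Bool.eq_false_iff.mpr h2
        rw [if_neg h2, h2f]
        simp only [Bool.not_false, if_true, List.filter_cons]
        by_cases h3 : pvIsMeta (PySem.Str.strip line) = true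
        · rw [if_pos h3, h3]
          simp only [Bool.not_true, Bool.false_eq_true, if_false]
          exact ih acc h
        · have h3f : pvIsMeta (PySem.Str.strip line) = false := Bool.eq_false_iff.mpr h3
          rw [if_neg h3, h3f]
          simp only [Bool.not_false, if_true]
          have htake : max_lines.toNat - acc.length
              = (max_lines.toNat - (acc.length + 1)) + 1 := by omega
          rw [htake, List.take_succ_cons]
          by_cases h4 : max_lines ≤ ((acc ++ [PySem.Str.strip line]).length : Int)
          · rw [if_pos h4]
            have h0 : max_lines.toNat - (acc.length + 1) = 0 := by
              simp only [List.length_append, List.length_cons, List.length_nil] at h4; omega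
            rw [h0, List.take_zero]
          · rw [if_neg h4]
            have h5 : ((acc ++ [PySem.Str.strip line]).length : Int) < max_lines := by
              simp only [List.length_append, List.length_cons, List.length_nil] at h4 ⊢
              omega
            rw [ih _ h5]
            simp

theorem pvAllBlank_loop (L : List String)
    (h : L.any (fun l => PySem.Str.strip l != "") = false)
    (ml : Int) (acc : List String) : pvALoop ml L acc = acc := by
  induction L generalizing acc with
  | nil => simp [pvALoop]
  | cons l rest ih =>
    simp only [pvALoop]
    simp only [List.any_cons, Bool.or_eq_false_iff, bne_eq_false_iff_eq] at h
    rw [if_pos h.1]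
    exact ih (by simpa using h.2) acc

-- ===== VERDICT (by name: the statement is the Claim_ definition above) =====
theorem compact_text_spec : Claim_unchanged_compact_text := by
  intro text max_lines _
  unfold Spec_compact_text
  intro hnd
  unfold D_compact_text at hnd
  unfold compact_text compact_text_alt
  by_cases hm : max_lines ≤ 0
  · rw [if_pos hm]
    have hc : (PySem.Str.splitlines (text.getD "")).any (fun l => PySem.Str.strip l != "") = false := by
      rcases Bool.eq_false_or_eq_true ((PySem.Str.splitlines (text.getD "")).any (fun l => PySem.Str.strip l != "")) with h | h
      · exact absurd ⟨hm, h⟩ hnd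
      · exact h
    exact pvAllBlank_loop _ hc _ _
  · rw [if_neg hm]
    rw [pvLoop_eq _ _ [] (by simp only [List.length_nil, Nat.cast_zero]; omega)]
    simp [pvPipe]

theorem compact_text_changed : Claim_changed_compact_text := by
  unfold Claim_changed_compact_text; decide
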